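-- pv_equiv track=rewrite | github.com/ttlaz123/alicpt_workspace | test.py | write_seq
-- ===== SOURCE A (Python) =====
-- def write_seq(min1, max1, min2, max2):
--     # min1, max1, min2, max2 are all int
--     seq = ['g2.' + str(min2), 'g1.' + str(min1)]
--     for i in range(min2+1, max2+1):
--         if i % 2 == min2 % 2:
--             seq.append('g1.' + str(min1))
--         else:
--             seq.append('g1.' + str(max1))
--         seq.append('g2.' + str(i))
--     return seq
-- ===== SOURCE B (Python) =====
-- def write_seq(min1, max1, min2, max2):
--     # closed-form generation: total output length computed up front, then each
--     # output position k produced directly by a per-position formula: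
--     # position 0 and odd k >= 3 carry 'g2.' + str(min2 + k//2); position 1 and
--     # even k >= 2 carry a g1 label chosen by the parity of k//2.
--     total = 2 + 2 * max(max2 - min2, 0)
--     g1 = ('g1.' + str(min1), 'g1.' + str(max1))
--     return ['g2.' + str(min2 + k // 2) if k == 0 or (k % 2 == 1 and k != 1)
--             else g1[(k // 2) % 2]
--             for k in range(total)]
-- ===== Notes on version B (the rewrite author's own statement) =====
-- stated objective: alternative
-- what changed: Replaces A's sequential append loop over the index range with a random-access closed form: the output length is computed up front and each output position k is produced directly by a per-position formula (parity of k and of k//2), with no interleaving or accumulator.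
import Mathlib
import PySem

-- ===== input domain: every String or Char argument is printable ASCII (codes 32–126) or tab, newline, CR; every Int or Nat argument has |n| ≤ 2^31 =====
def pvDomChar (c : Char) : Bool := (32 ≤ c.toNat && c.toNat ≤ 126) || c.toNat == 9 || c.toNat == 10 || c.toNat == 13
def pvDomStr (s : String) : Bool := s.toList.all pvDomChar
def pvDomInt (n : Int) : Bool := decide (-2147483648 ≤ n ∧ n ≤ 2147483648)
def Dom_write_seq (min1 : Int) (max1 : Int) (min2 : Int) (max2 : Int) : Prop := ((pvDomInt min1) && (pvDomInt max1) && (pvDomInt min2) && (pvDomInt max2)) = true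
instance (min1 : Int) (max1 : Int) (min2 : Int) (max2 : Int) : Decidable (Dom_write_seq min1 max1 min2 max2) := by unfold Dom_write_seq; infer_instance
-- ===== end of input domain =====

-- B replaces A's sequential append loop by a random-access closed form: each output
-- position is computed directly from its index (alternative decomposition, same cost).

-- ===== PORT A =====
def write_seq (min1 : Int) (max1 : Int) (min2 : Int) (max2 : Int) : List String :=
  (PySem.List.pyRange (min2 + 1) (max2 + 1) 1).foldl
    (fun seq i =>
      (seq ++ [if PySem.Int.mod i 2 = PySem.Int.mod min2 2
               then "g1." ++ PySem.Int.toStr min1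
               else "g1." ++ PySem.Int.toStr max1]) ++ ["g2." ++ PySem.Int.toStr i])
    ["g2." ++ PySem.Int.toStr min2, "g1." ++ PySem.Int.toStr min1]

-- ===== PORT B =====
def write_seq_alt (min1 : Int) (max1 : Int) (min2 : Int) (max2 : Int) : List String :=
  let total : Int := 2 + 2 * max (max2 - min2) 0
  let g1 : String × String := ("g1." ++ PySem.Int.toStr min1, "g1." ++ PySem.Int.toStr max1)
  (PySem.List.pyRange 0 total 1).map (fun k =>
    if k = 0 ∨ (PySem.Int.mod k 2 = 1 ∧ k ≠ 1)
    then "g2." ++ PySem.Int.toStr (min2 + PySem.Int.floordiv k 2)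
    -- Python indexes the pair g1[(k // 2) % 2]; that index is 0 or 1, ported as this conditional
    else if PySem.Int.mod (PySem.Int.floordiv k 2) 2 = 0 then g1.1 else g1.2)

-- ===== PRECONDITION & SPEC =====
def Spec_write_seq (min1 : Int) (max1 : Int) (min2 : Int) (max2 : Int) (out : List String) : Prop := out = write_seq_alt min1 max1 min2 max2
instance (min1 : Int) (max1 : Int) (min2 : Int) (max2 : Int) (out : List String) : Decidable (Spec_write_seq min1 max1 min2 max2 out) := by unfold Spec_write_seq; infer_instance

-- ===== CLAIM (what is proved, stated in full; the proofs are below) =====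
def Claim_equal_write_seq : Prop := ∀ (min1 : Int) (max1 : Int) (min2 : Int) (max2 : Int), Dom_write_seq min1 max1 min2 max2 → Spec_write_seq min1 max1 min2 max2 (write_seq min1 max1 min2 max2)

-- ===== LEMMAS AND PROOFS =====

-- proof-side name for the per-position formula of write_seq_alt (definitionally its map function)
def wsLabel (min1 : Int) (max1 : Int) (min2 : Int) (k : Int) : String :=
  if k = 0 ∨ (PySem.Int.mod k 2 = 1 ∧ k ≠ 1)
  then "g2." ++ PySem.Int.toStr (min2 + PySem.Int.floordiv k 2)
  else if PySem.Int.mod (PySem.Int.floordiv k 2) 2 = 0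
       then "g1." ++ PySem.Int.toStr min1 else "g1." ++ PySem.Int.toStr max1

-- write_seq_alt's map function is definitionally wsLabel
lemma write_seq_alt_eq_map (min1 max1 min2 max2 : Int) :
    write_seq_alt min1 max1 min2 max2
      = (PySem.List.pyRange 0 (2 + 2 * max (max2 - min2) 0) 1).map (wsLabel min1 max1 min2) := rfl

-- the fused loop over n iterations equals the index-formula list of length 2+2n
lemma write_seq_key (min1 max1 min2 : Int) (n : Nat) :
    (PySem.List.pyRange (min2 + 1) (min2 + 1 + n) 1).foldl
      (fun seq i =>
        (seq ++ [if PySem.Int.mod i 2 = PySem.Int.mod min2 2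
                 then "g1." ++ PySem.Int.toStr min1
                 else "g1." ++ PySem.Int.toStr max1]) ++ ["g2." ++ PySem.Int.toStr i])
      ["g2." ++ PySem.Int.toStr min2, "g1." ++ PySem.Int.toStr min1]
    = (PySem.List.pyRange 0 (2 + 2 * n) 1).map (wsLabel min1 max1 min2) := by
  induction n with
  | zero =>
    simp only [Nat.cast_zero, add_zero, mul_zero]
    rw [PySem.List.pyRange_one_eq_nil (le_refl _)]
    rw [show PySem.List.pyRange 0 2 1 = [0, 1] from by decide]
    simp [wsLabel, PySem.Int.mod, PySem.Int.floordiv]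
  | succ m ih =>
    have h1 : (min2 + 1 + ((m:Int) + 1)) = (min2 + 1 + m) + 1 := by push_cast; ring
    rw [show ((m.succ : Nat) : Int) = (m : Int) + 1 by norm_num, h1,
        PySem.List.pyRange_one_succ_right (by omega),
        show (2 + 2 * ((m:Int) + 1)) = (2 + 2 * m + 1) + 1 by ring,
        PySem.List.pyRange_one_succ_right (by omega),
        PySem.List.pyRange_one_succ_right (by omega)]
    rw [List.foldl_append, List.map_append, List.map_append, ih]
    have hg2 : wsLabel min1 max1 min2 (2 + 2 * (m:Int) + 1) = "g2." ++ PySem.Int.toStr (min2 + 1 + m) := by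
      have hc : (2 + 2 * (m:Int) + 1) = 0 ∨ (PySem.Int.mod (2 + 2 * (m:Int) + 1) 2 = 1 ∧ (2 + 2 * (m:Int) + 1) ≠ 1) := by
        simp only [PySem.Int.mod_eq_emod_of_pos (show (0:Int) < 2 by omega)]
        omega
      rw [wsLabel, if_pos hc, PySem.Int.floordiv_eq_ediv_of_pos (show (0:Int) < 2 by omega)]
      rw [show min2 + (2 + 2 * (m:Int) + 1) / 2 = min2 + 1 + m by omega]
    have hg1 : wsLabel min1 max1 min2 (2 + 2 * (m:Int)) =
        (if PySem.Int.mod (min2 + 1 + m) 2 = PySem.Int.mod min2 2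
         then "g1." ++ PySem.Int.toStr min1
         else "g1." ++ PySem.Int.toStr max1) := by
      have hc : ¬ ((2 + 2 * (m:Int)) = 0 ∨ (PySem.Int.mod (2 + 2 * (m:Int)) 2 = 1 ∧ (2 + 2 * (m:Int)) ≠ 1)) := by
        simp only [PySem.Int.mod_eq_emod_of_pos (show (0:Int) < 2 by omega)]
        omega
      rw [wsLabel, if_neg hc, PySem.Int.floordiv_eq_ediv_of_pos (show (0:Int) < 2 by omega)]
      have hdiv : (2 + 2 * (m:Int)) / 2 = (m:Int) + 1 := by omega
      rw [hdiv]
      have hiff : (PySem.Int.mod ((m:Int) + 1) 2 = 0) ↔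
          (PySem.Int.mod (min2 + 1 + (m:Int)) 2 = PySem.Int.mod min2 2) := by
        simp only [PySem.Int.mod_eq_emod_of_pos (show (0:Int) < 2 by omega)]
        omega
      by_cases hp : PySem.Int.mod (min2 + 1 + (m:Int)) 2 = PySem.Int.mod min2 2
      · rw [if_pos (hiff.mpr hp), if_pos hp]
      · rw [if_neg (fun h => hp (hiff.mp h)), if_neg hp]
    simp [hg1, hg2]

-- ===== VERDICT (by name: the statement is the Claim_ definition above) =====
theorem write_seq_spec : Claim_equal_write_seq := by
  intro min1 max1 min2 max2 _
  unfold Spec_write_seq write_seq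
  rw [write_seq_alt_eq_map]
  by_cases h : min2 ≤ max2
  · have hn : max2 + 1 = min2 + 1 + ((max2 - min2).toNat : Int) := by omega
    have hm : (2 + 2 * max (max2 - min2) 0) = 2 + 2 * (((max2 - min2).toNat : Nat) : Int) := by
      rw [max_eq_left (by omega)]; omega
    rw [hn, hm]
    exact write_seq_key min1 max1 min2 (max2 - min2).toNat
  · have hm : (2 + 2 * max (max2 - min2) 0) = 2 + 2 * ((0:Nat) : Int) := by
      rw [max_eq_right (by omega)]; norm_num
    rw [PySem.List.pyRange_one_eq_nil (show max2 + 1 ≤ min2 + 1 by omega), hm]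
    have := write_seq_key min1 max1 min2 0
    simp only [Nat.cast_zero, add_zero] at this
    rw [PySem.List.pyRange_one_eq_nil (le_refl _)] at this
    exact this
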